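-- pv_equiv track=rewrite | github.com/oscarsettje/Portfolio-App | tracker/analysis.py | infer_geography
-- ===== SOURCE A (Python) =====
-- def infer_geography(ticker: str) -> str:
--     """
--     Infer broad geography from ticker suffix.
--     This is a best-effort heuristic — not 100% accurate.
--     """
--     t = ticker.upper()
--     suffix_map = {
--         ".DE": "Europe", ".F": "Europe",  ".AS": "Europe", ".PA": "Europe",
--         ".MI": "Europe", ".MC": "Europe", ".SW": "Europe", ".L":  "Europe",
--         ".VI": "Europe", ".BR": "Europe", ".LS": "Europe", ".ST": "Europe",
--         ".HE": "Europe", ".OL": "Europe", ".CO": "Europe",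
--         ".T":  "Asia",   ".HK": "Asia",   ".SS": "Asia",   ".SZ": "Asia",
--         ".KS": "Asia",   ".NS": "Asia",   ".BO": "Asia",
--         ".AX": "Australia/NZ",
--         ".TO": "Canada", ".V":  "Canada",
--         ".SA": "LatAm",  ".MX": "LatAm",
--     }
--     for suffix, region in suffix_map.items():
--         if t.endswith(suffix):
--             return region
--     if "-USD" in t or "-EUR" in t or "-GBP" in t or "-BTC" in t:
--         return "Crypto (Global)"
--     return "North America"   # default — most plain tickers are US
-- ===== SOURCE B (Python) =====
-- _SUFFIX_GROUPS = [
--     ("Europe", {"DE", "F", "AS", "PA", "MI", "MC", "SW", "L",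
--                 "VI", "BR", "LS", "ST", "HE", "OL", "CO"}),
--     ("Asia", {"T", "HK", "SS", "SZ", "KS", "NS", "BO"}),
--     ("Australia/NZ", {"AX"}),
--     ("Canada", {"TO", "V"}),
--     ("LatAm", {"SA", "MX"}),
-- ]
--
--
-- def infer_geography(ticker: str) -> str:
--     """
--     Infer broad geography from ticker suffix.
--     This is a best-effort heuristic — not 100% accurate.
--     """
--     t = ticker.upper()
--     dot = t.rfind(".")
--     if dot >= 0:
--         suffix = t[dot + 1:]
--         for region, suffixes in _SUFFIX_GROUPS:
--             if suffix in suffixes: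
--                 return region
--     if any(pat in t for pat in ("-USD", "-EUR", "-GBP", "-BTC")):
--         return "Crypto (Global)"
--     return "North America"
-- ===== Notes on version B (the rewrite author's own statement) =====
-- stated objective: alternative
-- what changed: Inverts the map into region groups with bare-suffix sets: extracts the substring after the last dot (str.rfind) once and scans 5 region groups with set membership instead of running endswith over 27 dotted suffixes; the crypto fallback becomes an any() over the four patterns.
import Mathlib
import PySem

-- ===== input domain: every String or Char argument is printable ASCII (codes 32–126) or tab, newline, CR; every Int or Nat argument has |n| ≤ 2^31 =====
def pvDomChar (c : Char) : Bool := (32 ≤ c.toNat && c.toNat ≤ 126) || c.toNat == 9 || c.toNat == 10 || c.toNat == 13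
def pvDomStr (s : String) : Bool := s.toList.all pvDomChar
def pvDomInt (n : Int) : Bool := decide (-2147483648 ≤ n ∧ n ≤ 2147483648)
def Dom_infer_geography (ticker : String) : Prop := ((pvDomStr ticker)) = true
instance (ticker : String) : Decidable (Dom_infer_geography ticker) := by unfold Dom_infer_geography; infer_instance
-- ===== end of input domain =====

-- B inverts A's suffix→region dict into region groups with bare-suffix sets: it extracts the
-- substring after the last dot once and scans the 5 groups by set membership (alternative).

-- ===== PORT A =====
-- A's suffix_map dict, as its items list in insertion order (keys distinct)
def pvSuffixMap : List (String × String) :=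
  [(".DE", "Europe"), (".F", "Europe"), (".AS", "Europe"), (".PA", "Europe"),
   (".MI", "Europe"), (".MC", "Europe"), (".SW", "Europe"), (".L", "Europe"),
   (".VI", "Europe"), (".BR", "Europe"), (".LS", "Europe"), (".ST", "Europe"),
   (".HE", "Europe"), (".OL", "Europe"), (".CO", "Europe"),
   (".T", "Asia"), (".HK", "Asia"), (".SS", "Asia"), (".SZ", "Asia"),
   (".KS", "Asia"), (".NS", "Asia"), (".BO", "Asia"),
   (".AX", "Australia/NZ"),
   (".TO", "Canada"), (".V", "Canada"),
   (".SA", "LatAm"), (".MX", "LatAm")]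

-- A's 'for suffix, region in suffix_map.items(): if t.endswith(suffix): return region'
def pvLoopA (t : String) : List (String × String) → Option String
  | [] => none
  | (suffix, region) :: rest =>
      if PySem.Str.endswith t suffix then some region else pvLoopA t rest

def infer_geography (ticker : String) : String :=
  let t := PySem.Str.upper ticker
  match pvLoopA t pvSuffixMap with
  | some region => region
  | none =>
      if PySem.Str.isIn "-USD" t || PySem.Str.isIn "-EUR" t ||
         PySem.Str.isIn "-GBP" t || PySem.Str.isIn "-BTC" t then "Crypto (Global)"
      else "North America"

-- ===== PORT B =====
-- B's _SUFFIX_GROUPS: region → set of bare suffixes (sets only ever used for membership)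
def pvSuffixGroups : List (String × PySem.Set String) :=
  [("Europe", PySem.Set.ofList
      ["DE", "F", "AS", "PA", "MI", "MC", "SW", "L",
       "VI", "BR", "LS", "ST", "HE", "OL", "CO"]),
   ("Asia", PySem.Set.ofList ["T", "HK", "SS", "SZ", "KS", "NS", "BO"]),
   ("Australia/NZ", PySem.Set.ofList ["AX"]),
   ("Canada", PySem.Set.ofList ["TO", "V"]),
   ("LatAm", PySem.Set.ofList ["SA", "MX"])]

-- B's 'for region, suffixes in _SUFFIX_GROUPS: if suffix in suffixes: return region'
def pvGroupScan (suffix : String) : List (String × PySem.Set String) → Option String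
  | [] => none
  | (region, sufs) :: rest =>
      if PySem.Set.contains sufs suffix then some region else pvGroupScan suffix rest

def infer_geography_alt (ticker : String) : String :=
  let t := PySem.Str.upper ticker
  let dot := PySem.Str.rfind t "."
  let fromSuffix : Option String :=
    if 0 ≤ dot then
      pvGroupScan (PySem.Str.slice t (some (dot + 1)) none) pvSuffixGroups
    else none
  match fromSuffix with
  | some region => region
  | none =>
      if ["-USD", "-EUR", "-GBP", "-BTC"].any (fun pat => PySem.Str.isIn pat t) then
        "Crypto (Global)"
      else "North America"

-- ===== PRECONDITION & SPEC =====
def Spec_infer_geography (ticker : String) (out : String) : Prop := out = infer_geography_alt ticker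
instance (ticker : String) (out : String) : Decidable (Spec_infer_geography ticker out) := by unfold Spec_infer_geography; infer_instance

-- ===== CLAIM (what is proved, stated in full; the proofs are below) =====
def Claim_equal_infer_geography : Prop := ∀ (ticker : String), Dom_infer_geography ticker → Spec_infer_geography ticker (infer_geography ticker)

-- ===== LEMMAS AND PROOFS =====

-- the dot-free tail after the last '.' is unique
lemma pv_tail_unique {p q x y : List Char} (hx : '.' ∉ x) (hy : '.' ∉ y)
    (h : p ++ '.' :: x = q ++ '.' :: y) : x = y := by
  have hr := congrArg List.reverse h
  simp only [List.reverse_append, List.reverse_cons] at hr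
  have key : ∀ (z w : List Char), '.' ∉ z →
      List.takeWhile (fun c => c != '.') (z.reverse ++ ['.'] ++ w) = z.reverse := by
    intro z w hz
    rw [List.append_assoc, List.takeWhile_append_of_pos (by
      intro c hc
      simp only [bne_iff_ne, ne_eq]
      intro hcd
      exact hz (by simpa [hcd] using List.mem_reverse.mp hc))]
    have h0 : List.takeWhile (fun c => c != '.') (['.'] ++ w) = [] := by
      rw [List.singleton_append, List.takeWhile_cons_of_neg (by simp)]
    rw [h0, List.append_nil]
  have hxy : x.reverse = y.reverse := by
    rw [← key x p.reverse hx, ← key y q.reverse hy, hr]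
  simpa using congrArg List.reverse hxy

-- ['.'] is a prefix of l.drop i exactly when l[i] is '.'
lemma pv_single_prefix (l : List Char) (i : Nat) :
    (['.'].isPrefixOf (l.drop i) = true) ↔ l[i]? = some '.' := by
  rw [← List.head?_drop]
  cases h : l.drop i with
  | nil => simp [List.isPrefixOf]
  | cons a t =>
      simp only [List.isPrefixOf, List.head?_cons, Bool.and_eq_true, beq_iff_eq,
        Option.some.injEq]
      constructor
      · rintro ⟨h1, _⟩; exact h1.symm
      · intro h1; exact ⟨h1.symm, trivial⟩

-- characterization of PySem.Chars.rfind.go for the single-char needle '.'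
lemma pv_go_cases (l : List Char) (j : Nat) :
    (PySem.Chars.rfind.go l ['.'] j = -1 ∧ ∀ i ≤ j, l[i]? ≠ some '.') ∨
    (∃ k : Nat, k ≤ j ∧ PySem.Chars.rfind.go l ['.'] j = (k : Int) ∧
       l[k]? = some '.' ∧ ∀ i, k < i → i ≤ j → l[i]? ≠ some '.') := by
  induction j with
  | zero =>
      by_cases h : l[0]? = some '.'
      · right
        refine ⟨0, le_refl 0, ?_, h, by omega⟩
        have hp := (pv_single_prefix l 0).mpr h
        rw [List.drop_zero] at hp
        simp only [PySem.Chars.rfind.go]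
        rw [if_pos hp]
        simp
      · left
        refine ⟨?_, ?_⟩
        · simp only [PySem.Chars.rfind.go]
          rw [if_neg]
          intro hp
          apply h
          apply (pv_single_prefix l 0).mp
          rw [List.drop_zero]
          exact hp
        · intro i hi
          interval_cases i
          exact h
  | succ j ih =>
      by_cases h : l[j+1]? = some '.'
      · right
        refine ⟨j+1, le_refl _, ?_, h, by omega⟩
        simp only [PySem.Chars.rfind.go]
        rw [if_pos ((pv_single_prefix l (j+1)).mpr h)]
      · have hgo : PySem.Chars.rfind.go l ['.'] (j+1) = PySem.Chars.rfind.go l ['.'] j := by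
          simp only [PySem.Chars.rfind.go]
          rw [if_neg]
          intro hp
          exact h ((pv_single_prefix l (j+1)).mp hp)
        rcases ih with ⟨hv, hall⟩ | ⟨k, hk, hv, hdot, hall⟩
        · left
          refine ⟨by rw [hgo]; exact hv, ?_⟩
          intro i hi
          rcases Nat.lt_or_ge i (j+1) with hlt | hge
          · exact hall i (by omega)
          · have hieq : i = j + 1 := by omega
            rw [hieq]; exact h
        · right
          refine ⟨k, by omega, by rw [hgo]; exact hv, hdot, ?_⟩
          intro i h1 h2
          rcases Nat.lt_or_ge i (j+1) with hlt | hge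
          · exact hall i h1 (by omega)
          · have hieq : i = j + 1 := by omega
            rw [hieq]; exact h

-- every key of A's table is '.' followed by a dot-free bare suffix (checkable form)
lemma pv_keys_dotted_dec :
    ∀ e ∈ pvSuffixMap, e.1.toList.take 1 = ['.'] ∧ '.' ∉ e.1.toList.drop 1 := by
  decide

lemma pv_keys_dotted : ∀ e ∈ pvSuffixMap, e.1.toList = '.' :: e.1.toList.drop 1 ∧ '.' ∉ e.1.toList.drop 1 := by
  intro e he
  obtain ⟨h1, h2⟩ := pv_keys_dotted_dec e he
  refine ⟨?_, h2⟩
  conv_lhs => rw [← List.take_append_drop 1 e.1.toList]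
  rw [h1]
  rfl

-- no '.' in t: every endswith on a dotted key fails, so A's whole scan yields none
lemma pv_loopA_none (t : String) (h : '.' ∉ t.toList) :
    ∀ entries : List (String × String),
      (∀ e ∈ entries, e.1.toList = '.' :: e.1.toList.drop 1) → pvLoopA t entries = none := by
  intro entries
  induction entries with
  | nil => intro _; rfl
  | cons e rest ih =>
      intro hkeys
      have hc := hkeys e List.mem_cons_self
      have hend : ¬ (PySem.Str.endswith t e.1 = true) := by
        intro hE
        rw [PySem.Str.endswith_eq] at hE
        have hsfx : e.1.toList <:+ t.toList := by
          simp only [PySem.Chars.endswith] at hE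
          exact List.isSuffixOf_iff_suffix.mp hE
        apply h
        apply hsfx.subset
        rw [hc]
        exact List.mem_cons_self
      obtain ⟨k, r⟩ := e
      simp only [pvLoopA]
      rw [if_neg hend]
      exact ih (fun e' he' => hkeys e' (List.mem_cons_of_mem _ he'))

-- t = pre ++ '.' :: u with u dot-free: endswith a dotted key ↔ the key's tail is u,
-- so A's scan over dotted keys equals a lookup of u among the bare keys
lemma pv_loopA_lookup (t S : String) (pre u : List Char)
    (hl : t.toList = pre ++ '.' :: u) (hu : '.' ∉ u) (hS : S.toList = u) :
    ∀ entries : List (String × String),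
      (∀ e ∈ entries, e.1.toList = '.' :: e.1.toList.drop 1 ∧ '.' ∉ e.1.toList.drop 1) →
      pvLoopA t entries =
        (PySem.Dict.mk (entries.map (fun e => (String.ofList (e.1.toList.drop 1), e.2)))).get? S := by
  intro entries
  induction entries with
  | nil => intro _; rfl
  | cons e rest ih =>
      intro hkeys
      obtain ⟨hc, hcdot⟩ := hkeys e List.mem_cons_self
      have hiff : (PySem.Str.endswith t e.1 = true) ↔ S = String.ofList (e.1.toList.drop 1) := by
        rw [PySem.Str.endswith_eq, PySem.Chars.endswith_iff]
        constructor
        · rintro ⟨p, hp⟩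
          rw [hc] at hp
          have hcu : e.1.toList.drop 1 = u := pv_tail_unique hcdot hu (hp.trans hl)
          apply String.toList_inj.mp
          rw [hS, String.toList_ofList, hcu]
        · intro hSc
          refine ⟨pre, ?_⟩
          have hcu : e.1.toList.drop 1 = u := by
            have h2 := congrArg String.toList hSc
            rw [hS, String.toList_ofList] at h2
            exact h2.symm
          rw [hc, hcu, ← hl]
      obtain ⟨k, r⟩ := e
      simp only [pvLoopA, List.map_cons, PySem.Dict.get?_mk_cons]
      by_cases hmatch : S = String.ofList (k.toList.drop 1)
      · rw [if_pos (hiff.mpr hmatch), if_pos (by rw [hmatch]; exact beq_self_eq_true _)]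
      · rw [if_neg (fun hE => hmatch (hiff.mp hE)),
            if_neg (fun hbe => hmatch (beq_iff_eq.mp hbe).symm)]
        exact ih (fun e' he' => hkeys e' (List.mem_cons_of_mem _ he'))

-- a block of keys all mapping to the same value: lookup = membership test, then the rest
lemma pv_lookup_block (S r : String) (sufs : List String) (rest : List (String × String)) :
    (PySem.Dict.mk (sufs.map (fun k => (k, r)) ++ rest)).get? S =
      (if sufs.contains S then some r else (PySem.Dict.mk rest).get? S) := by
  induction sufs with
  | nil => simp
  | cons k ks ih =>
      simp only [List.map_cons, List.cons_append, PySem.Dict.get?_mk_cons, List.contains_cons]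
      by_cases hk : k = S
      · rw [if_pos (beq_iff_eq.mpr hk), if_pos (by simp [hk])]
      · have h2 : (S == k) = false := beq_eq_false_iff_ne.mpr (Ne.symm hk)
        rw [if_neg (by simp [hk]), ih]
        simp [h2]

-- B's group scan = assoc lookup in the flattened (suffix, region) list
lemma pv_group_flat (S : String) :
    ∀ groups : List (String × PySem.Set String),
      pvGroupScan S groups =
        (PySem.Dict.mk (groups.flatMap (fun g => g.2.map (fun k => (k, g.1))))).get? S := by
  intro groups
  induction groups with
  | nil => rfl
  | cons g rest ih =>
      obtain ⟨r, sufs⟩ := g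
      simp only [pvGroupScan, List.flatMap_cons]
      rw [pv_lookup_block, ih]
      by_cases hmem : List.contains sufs S
      · rw [if_pos hmem, if_pos (by simpa using hmem)]
      · rw [if_neg hmem, if_neg (by simpa using hmem)]

-- B's flattened groups are exactly A's table with the leading dot stripped off each key
lemma pv_flat_eq :
    pvSuffixGroups.flatMap (fun g => g.2.map (fun k => (k, g.1))) =
      pvSuffixMap.map (fun e => (String.ofList (e.1.toList.drop 1), e.2)) := by
  decide

-- the two suffix computations agree
lemma pv_core (t : String) :
    pvLoopA t pvSuffixMap =
      (if 0 ≤ PySem.Str.rfind t "." then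
        pvGroupScan (PySem.Str.slice t (some (PySem.Str.rfind t "." + 1)) none) pvSuffixGroups
      else none) := by
  have hrfind : PySem.Str.rfind t "." =
      PySem.Chars.rfind.go t.toList ['.'] t.toList.length := by
    rw [PySem.Str.rfind_eq]
    rfl
  rcases pv_go_cases t.toList t.toList.length with ⟨hv, hall⟩ | ⟨k, hk, hv, hdot, hall⟩
  · -- no dot anywhere: both sides none
    rw [if_neg (by rw [hrfind, hv]; omega)]
    apply pv_loopA_none
    · intro hmem
      obtain ⟨i, hi, hgi⟩ := List.getElem_of_mem hmem
      exact hall i (by omega) (by rw [List.getElem?_eq_getElem hi, hgi])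
    · exact fun e he => (pv_keys_dotted e he).1
  · -- last dot at index k; A's scan = lookup of the tail after it
    obtain ⟨hklen, hgk⟩ := List.getElem?_eq_some_iff.mp hdot
    have hdrop : t.toList.drop k = '.' :: t.toList.drop (k+1) := by
      rw [List.drop_eq_getElem_cons hklen, hgk]
    have hl : t.toList = t.toList.take k ++ '.' :: t.toList.drop (k+1) := by
      conv_lhs => rw [← List.take_append_drop k t.toList]
      rw [hdrop]
    have hu : '.' ∉ t.toList.drop (k+1) := by
      intro hmem
      obtain ⟨i, hi, hgi⟩ := List.getElem_of_mem hmem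
      have hilen : k + 1 + i < t.toList.length := by
        rw [List.length_drop] at hi
        omega
      refine hall (k+1+i) (by omega) (by omega) ?_
      rw [List.getElem?_eq_getElem hilen]
      rw [List.getElem_drop] at hgi
      rw [hgi]
    have hdotval : PySem.Str.rfind t "." = (k : Int) := by rw [hrfind, hv]
    rw [hdotval, if_pos (by omega)]
    have hS : (PySem.Str.slice t (some ((k : Int) + 1)) none).toList
        = t.toList.drop (k+1) := by
      rw [PySem.Str.toList_slice, PySem.Chars.slice_eq_listSlice]
      have hcast : (k : Int) + 1 = ((k+1 : Nat) : Int) := by push_cast; ring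
      rw [hcast, PySem.List.slice_from_natCast]
    rw [pv_group_flat, pv_flat_eq]
    exact pv_loopA_lookup t _ _ _ hl hu hS pvSuffixMap pv_keys_dotted

-- ===== VERDICT (by name: the statement is the Claim_ definition above) =====
theorem infer_geography_spec : Claim_equal_infer_geography := by
  intro ticker _
  unfold Spec_infer_geography infer_geography infer_geography_alt
  simp only [pv_core (PySem.Str.upper ticker), List.any, Bool.or_false, Bool.or_assoc]
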